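-- pv_equiv track=rewrite | github.com/kmkholm/cybersecurity_toolkit-ML- | v7.py | has_year_like
-- ===== SOURCE A (Python) =====
-- def has_year_like(pw):
--     """Detect year patterns"""
--     for i in range(len(pw) - 3):
--         chunk = pw[i:i+4]
--         if chunk.isdigit():
--             y = int(chunk)
--             if 1900 <= y <= 2099:
--                 return 1
--     return 0
-- ===== SOURCE B (Python) =====
-- def has_year_like(pw):
--     """Detect year patterns"""
--     # Single character-by-character pass through a tiny NFA for the regular
--     # expression (19|20)\d\d: one boolean per partial-match state, no window
--     # slicing, no isdigit()/int() on substrings.  A year 1900-2099 is exactly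
--     # a match of that pattern, so acceptance <=> A's window test succeeds.
--     a1 = a2 = False   # last char was '1' / was '2'
--     b_ = c_ = False   # just read "19"/"20"; that plus one more digit
--     for ch in pw:
--         d = ch in "0123456789"
--         if c_ and d:
--             return 1
--         c_ = b_ and d
--         b_ = (a1 and ch == '9') or (a2 and ch == '0')
--         a1 = ch == '1'
--         a2 = ch == '2'
--     return 0
-- ===== Notes on version B (the rewrite author's own statement) =====
-- stated objective: alternative
-- what changed: B replaces A's sliding 4-char window with isdigit()/int() range test by a single character-at-a-time pass through a hand-compiled 4-state NFA for the regular expression (19|20)\d\d, carrying one boolean per partial-match state; no substring is ever built or parsed.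
import Mathlib
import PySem

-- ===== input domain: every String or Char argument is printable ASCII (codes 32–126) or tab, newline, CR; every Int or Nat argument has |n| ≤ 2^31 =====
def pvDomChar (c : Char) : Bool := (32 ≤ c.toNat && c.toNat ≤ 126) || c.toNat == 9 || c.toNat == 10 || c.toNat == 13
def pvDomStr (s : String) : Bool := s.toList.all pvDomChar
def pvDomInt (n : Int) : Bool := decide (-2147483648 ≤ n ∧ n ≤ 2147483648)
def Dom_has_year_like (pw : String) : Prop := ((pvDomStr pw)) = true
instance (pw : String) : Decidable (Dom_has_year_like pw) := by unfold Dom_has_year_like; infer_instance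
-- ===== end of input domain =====

-- B replaces A's sliding 4-char window (slice + isdigit + int range test) by a single
-- character-at-a-time pass through a hand-compiled 4-state NFA for (19|20)\d\d.

-- ===== PORT A =====
-- the for-loop over i in range(len(pw)-3) with early return, as a fuel recursion
-- (fuel = len - 3 in Nat, i.e. 0 iterations when len < 4, exactly range's length)
def hasYearLoop (cs : List Char) (i : Nat) : Nat → Int
  | 0 => 0
  | fuel + 1 =>
    let chunk := PySem.List.slice cs (some (i : Int)) (some ((i : Int) + 4))  -- pw[i:i+4]
    if PySem.Chars.strIsdigit chunk then
      -- chunk.isdigit() guarantees int(chunk) succeeds, so the getD default is never used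
      let y : Int := (PySem.Int.ofChars? chunk).getD 0
      if 1900 ≤ y ∧ y ≤ 2099 then 1
      else hasYearLoop cs (i + 1) fuel
    else hasYearLoop cs (i + 1) fuel

def has_year_like (pw : String) : Int :=
  hasYearLoop pw.toList 0 (pw.toList.length - 3)

-- ===== PORT B =====
def pyDigitChars : List Char := ['0','1','2','3','4','5','6','7','8','9']  -- "0123456789"

-- Source B's for-loop over the characters, state = the four NFA booleans
def nfaScan : List Char → Bool → Bool → Bool → Bool → Int
  | [], _, _, _, _ => 0
  | ch :: rest, a1, a2, b_, c_ =>
    let d := pyDigitChars.contains ch                       -- ch in "0123456789"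
    if c_ && d then 1
    else nfaScan rest (ch == '1') (ch == '2')
           ((a1 && ch == '9') || (a2 && ch == '0')) (b_ && d)

def has_year_like_alt (pw : String) : Int :=
  nfaScan pw.toList false false false false

-- ===== PRECONDITION & SPEC =====
def Spec_has_year_like (pw : String) (out : Int) : Prop := out = has_year_like_alt pw
instance (pw : String) (out : Int) : Decidable (Spec_has_year_like pw out) := by unfold Spec_has_year_like; infer_instance

-- ===== CLAIM (what is proved, stated in full; the proofs are below) =====
def Claim_equal_has_year_like : Prop := ∀ (pw : String), Dom_has_year_like pw → Spec_has_year_like pw (has_year_like pw)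

-- ===== LEMMAS AND PROOFS =====

-- proof-side intermediate: A as a window recursion over the character pattern
def winScan : List Char → Int
  | a :: b :: c :: d :: rest =>
    if ((a == '1' && b == '9') || (a == '2' && b == '0'))
        && pyDigitChars.contains c && pyDigitChars.contains d then 1
    else winScan (b :: c :: d :: rest)
  | _ => 0
termination_by cs => cs.length
decreasing_by simp

-- every ASCII digit char is Char.ofNat (48 + i) for some i < 10
lemma digit_shape (a : Char) (h : PySem.Chars.isdigit a = true) :
    ∃ i, i < 10 ∧ a = Char.ofNat (48 + i) := by
  simp [PySem.Chars.isdigit, Char.le_def] at h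
  obtain ⟨h1, h2⟩ := h
  have h1' := UInt32.le_iff_toNat_le.mp h1
  have h2' := UInt32.le_iff_toNat_le.mp h2
  have e1 : (48 : UInt32).toNat = 48 := by decide
  have e2 : (57 : UInt32).toNat = 57 := by decide
  rw [e1] at h1'; rw [e2] at h2'
  refine ⟨a.val.toNat - 48, by omega, ?_⟩
  have : 48 + (a.val.toNat - 48) = a.toNat := by unfold Char.toNat; omega
  rw [this]
  exact (Char.ofNat_toNat a).symm

-- kernel check over all 10^4 digit quadruples: the numeric test 1900 ≤ int(chunk) ≤ 2099
-- coincides with the character pattern ('19' or '20' then two digits)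
def yearChk : Bool :=
  (List.range 10).all fun i => (List.range 10).all fun j =>
    (List.range 10).all fun k => (List.range 10).all fun l =>
      let a := Char.ofNat (48+i); let b := Char.ofNat (48+j)
      let c := Char.ofNat (48+k); let d := Char.ofNat (48+l)
      let v := (PySem.Int.ofChars? [a,b,c,d]).getD 0
      (decide (1900 ≤ v ∧ v ≤ 2099)) == ((a == '1' && b == '9') || (a == '2' && b == '0'))

set_option maxHeartbeats 2000000 in
lemma yearChk_true : yearChk = true := by decide

lemma key_iff (a b c d : Char) (ha : PySem.Chars.isdigit a = true) (hb : PySem.Chars.isdigit b = true)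
    (hc : PySem.Chars.isdigit c = true) (hd : PySem.Chars.isdigit d = true) :
    (decide (1900 ≤ (PySem.Int.ofChars? [a,b,c,d]).getD 0 ∧ (PySem.Int.ofChars? [a,b,c,d]).getD 0 ≤ 2099))
      = ((a == '1' && b == '9') || (a == '2' && b == '0')) := by
  obtain ⟨i, hi, rfl⟩ := digit_shape a ha
  obtain ⟨j, hj, rfl⟩ := digit_shape b hb
  obtain ⟨k, hk, rfl⟩ := digit_shape c hc
  obtain ⟨l, hl, rfl⟩ := digit_shape d hd
  have h := yearChk_true
  simp only [yearChk, List.all_eq_true, List.mem_range] at h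
  simpa using h i hi j hj k hk l hl

lemma contains_eq_isdigit (x : Char) :
    pyDigitChars.contains x = PySem.Chars.isdigit x := by
  by_cases h : PySem.Chars.isdigit x = true
  · rw [h]
    obtain ⟨i, hi, rfl⟩ := digit_shape x h
    interval_cases i <;> decide
  · simp at h
    rw [h]
    simp only [pyDigitChars, List.contains_eq_mem, decide_eq_false_iff_not]
    intro hm
    have hd : PySem.Chars.isdigit x = true := by fin_cases hm <;> decide
    rw [h] at hd
    exact Bool.false_ne_true hd

lemma ne_of_not_digit (x c' : Char) (hc' : PySem.Chars.isdigit c' = true)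
    (h : PySem.Chars.isdigit x = false) : (x == c') = false := by
  rw [beq_eq_false_iff_ne]
  rintro rfl
  rw [h] at hc'
  exact Bool.false_ne_true hc'

-- if not all four chars are digits, the window pattern is false
lemma condB_false (a b c d : Char)
    (h : (PySem.Chars.isdigit a && PySem.Chars.isdigit b && PySem.Chars.isdigit c && PySem.Chars.isdigit d) = false) :
    (((a == '1' && b == '9') || (a == '2' && b == '0'))
        && pyDigitChars.contains c && pyDigitChars.contains d) = false := by
  rw [contains_eq_isdigit, contains_eq_isdigit]
  by_cases hC : PySem.Chars.isdigit c = true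
  · by_cases hD : PySem.Chars.isdigit d = true
    · simp only [hC, hD, Bool.and_true] at h ⊢
      rcases Bool.and_eq_false_iff.mp h with h | h
      · simp [ne_of_not_digit a '1' (by decide) h, ne_of_not_digit a '2' (by decide) h]
      · simp [ne_of_not_digit b '9' (by decide) h, ne_of_not_digit b '0' (by decide) h]
    · rw [Bool.not_eq_true] at hD
      rw [hD]
      simp
  · rw [Bool.not_eq_true] at hC
    rw [hC]
    simp

lemma chunk_eq (cs : List Char) (i : Nat) (s : List Char) (h : cs.drop i = s) :
    PySem.List.slice cs (some (i : Int)) (some ((i : Int) + 4)) = s.take 4 := by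
  have hcast : ((i : Int) + 4) = ((i + 4 : Nat) : Int) := by push_cast; ring
  rw [hcast, PySem.List.slice_natCast, h]
  congr 1
  omega

lemma scan_eq (s : List Char) : ∀ (cs : List Char) (i : Nat), cs.drop i = s →
    hasYearLoop cs i (s.length - 3) = winScan s := by
  induction s with
  | nil => intro cs i h; simp [hasYearLoop, winScan]
  | cons a t ih =>
    intro cs i h
    match t, ih with
    | [], _ => simp [hasYearLoop, winScan]
    | [b], _ => simp [hasYearLoop, winScan]
    | [b, c], _ => simp [hasYearLoop, winScan]
    | b :: c :: d :: r, ih =>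
      have hdrop : cs.drop (i + 1) = b :: c :: d :: r := by
        rw [← List.drop_drop, h]
        rfl
      have hch := chunk_eq cs i _ h
      have hrec : hasYearLoop cs (i + 1) ((b :: c :: d :: r).length - 3) = winScan (b :: c :: d :: r) :=
        ih cs (i + 1) hdrop
      have hrec' : hasYearLoop cs (i + 1) r.length = winScan (b :: c :: d :: r) := by
        simpa using hrec
      show hasYearLoop cs i ((a :: b :: c :: d :: r).length - 3) = winScan (a :: b :: c :: d :: r)
      have hlen : (a :: b :: c :: d :: r).length - 3 = r.length + 1 := by simp
      rw [hlen]
      rw [hasYearLoop, winScan]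
      have h4 : (a :: b :: c :: d :: r).take 4 = [a, b, c, d] := rfl
      rw [h4] at hch
      simp only [hch]
      by_cases hall : (PySem.Chars.isdigit a && PySem.Chars.isdigit b
          && PySem.Chars.isdigit c && PySem.Chars.isdigit d) = true
      · simp only [Bool.and_eq_true] at hall
        obtain ⟨⟨⟨ha, hb⟩, hc⟩, hd⟩ := hall
        have hdig : PySem.Chars.strIsdigit [a, b, c, d] = true := by
          simp [PySem.Chars.strIsdigit, ha, hb, hc, hd]
        have hk := key_iff a b c d ha hb hc hd
        simp only [hdig, if_true]
        simp only [contains_eq_isdigit, hc, hd, Bool.and_true]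
        by_cases hy : (1900 ≤ (PySem.Int.ofChars? [a, b, c, d]).getD 0
            ∧ (PySem.Int.ofChars? [a, b, c, d]).getD 0 ≤ 2099)
        · have hbt : ((a == '1' && b == '9') || (a == '2' && b == '0')) = true := by
            rw [← hk]; simp [hy]
          simp [hy, hbt]
        · have hbf : ((a == '1' && b == '9') || (a == '2' && b == '0')) = false := by
            rw [← hk]; simp [hy]
          simp [hy, hbf, hrec']
      · simp only [Bool.not_eq_true] at hall
        have hdig : PySem.Chars.strIsdigit [a, b, c, d] = false := by
          simp [PySem.Chars.strIsdigit] at hall ⊢; tauto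
        simp only [hdig, Bool.false_eq_true, if_false]
        rw [condB_false a b c d hall]
        simpa using hrec'

-- Bool predicates describing what each NFA state needs from the REST of the input
def anyWindow : List Char → Bool
  | a :: b :: c :: d :: rest =>
    (((a == '1' && b == '9') || (a == '2' && b == '0'))
        && pyDigitChars.contains c && pyDigitChars.contains d) || anyWindow (b :: c :: d :: rest)
  | _ => false
termination_by cs => cs.length
decreasing_by simp

def need1 : List Char → Bool
  | x :: _ => pyDigitChars.contains x
  | [] => false
def need2 : List Char → Bool
  | x :: y :: _ => pyDigitChars.contains x && pyDigitChars.contains y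
  | _ => false
def need9 : List Char → Bool
  | x :: y :: z :: _ => (x == '9') && pyDigitChars.contains y && pyDigitChars.contains z
  | _ => false
def need0 : List Char → Bool
  | x :: y :: z :: _ => (x == '0') && pyDigitChars.contains y && pyDigitChars.contains z
  | _ => false

lemma boolAW (p q u v dz dw aw : Bool) :
    ((p && u || q && v) && dz && dw || aw)
      = (p && (u && dz && dw) || q && (v && dz && dw) || aw) := by
  cases p <;> cases q <;> cases u <;> cases v <;> cases dz <;> cases dw <;> cases aw <;> rfl

lemma boolStep : ∀ (E1 E2 E9 E0 D AW N1 N2 N9 N0 a1 a2 b : Bool),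
    (AW || b && D && N1 || (a1 && E9 || a2 && E0) && N2 || E1 && N9 || E2 && N0)
      = ((E1 && N9 || E2 && N0 || AW) || false || b && (D && N1)
          || a1 && (E9 && N2) || a2 && (E0 && N2)) := by decide

lemma nfaScan_eq (s : List Char) : ∀ (a1 a2 b_ c_ : Bool),
    nfaScan s a1 a2 b_ c_ =
      if anyWindow s || (c_ && need1 s) || (b_ && need2 s)
          || (a1 && need9 s) || (a2 && need0 s) then 1 else 0 := by
  induction s with
  | nil => intro a1 a2 b_ c_; simp [nfaScan, anyWindow, need1, need2, need9, need0]
  | cons ch rest ih =>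
    intro a1 a2 b_ c_
    rw [nfaScan]
    simp only [ih]
    have hAW : anyWindow (ch :: rest)
        = ((ch == '1') && need9 rest || (ch == '2') && need0 rest || anyWindow rest) := by
      match rest with
      | [] => simp [anyWindow, need9, need0]
      | [y] => simp [anyWindow, need9, need0]
      | [y, z] => simp [anyWindow, need9, need0]
      | y :: z :: w :: r =>
        rw [anyWindow, need9, need0]
        exact boolAW _ _ _ _ _ _ _
    have h1 : need1 (ch :: rest) = pyDigitChars.contains ch := rfl
    have h2 : need2 (ch :: rest) = (pyDigitChars.contains ch && need1 rest) := by
      match rest with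
      | [] => simp [need2, need1]
      | y :: r => rfl
    have h9 : need9 (ch :: rest) = ((ch == '9') && need2 rest) := by
      match rest with
      | [] => simp [need9, need2]
      | [y] => simp [need9, need2]
      | y :: z :: r => rw [need9, need2]; cases ch == '9' <;> simp
    have h0 : need0 (ch :: rest) = ((ch == '0') && need2 rest) := by
      match rest with
      | [] => simp [need0, need2]
      | [y] => simp [need0, need2]
      | y :: z :: r => rw [need0, need2]; cases ch == '0' <;> simp
    rw [hAW, h1, h2, h9, h0]
    cases hcd : (c_ && pyDigitChars.contains ch) with
    | true => simp
    | false =>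
      rw [boolStep (ch == '1') (ch == '2') (ch == '9') (ch == '0') (pyDigitChars.contains ch)
        (anyWindow rest) (need1 rest) (need2 rest) (need9 rest) (need0 rest) a1 a2 b_]
      simp

lemma winScan_eq_anyWindow (s : List Char) :
    winScan s = if anyWindow s then 1 else 0 := by
  induction s using winScan.induct with
  | case1 a b c d rest ht =>
    rw [winScan, anyWindow, ht]
    simp
  | case2 a b c d rest ht ih =>
    rw [Bool.not_eq_true] at ht
    rw [winScan, anyWindow, ht]
    simp [ih]
  | case3 s hs =>
    match s, hs with
    | [], _ => simp [winScan, anyWindow]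
    | [_], _ => simp [winScan, anyWindow]
    | [_, _], _ => simp [winScan, anyWindow]
    | [_, _, _], _ => simp [winScan, anyWindow]
    | _ :: _ :: _ :: _ :: _, hs => exact (hs _ _ _ _ _ rfl).elim

-- ===== VERDICT (by name: the statement is the Claim_ definition above) =====
theorem has_year_like_spec : Claim_equal_has_year_like := by
  intro pw _
  unfold Spec_has_year_like has_year_like has_year_like_alt
  rw [scan_eq pw.toList pw.toList 0 rfl, winScan_eq_anyWindow,
    nfaScan_eq]
  simp [need1, need2, need9, need0]
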